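-- pv_equiv track=rewrite | github.com/S3pR78/Bachelor_Thesis | code/src/evaluate/dataset_loader.py | get_unique_field_values
-- ===== SOURCE A (Python) =====
-- from typing import Any
--
-- def get_unique_field_values(
--     entries: list[dict[str, Any]],
--     field_name: str,
-- ) -> list[str]:
--     """Return sorted unique non-null values for one field."""
--     unique_values = {
--         entry.get(field_name)
--         for entry in entries
--         if isinstance(entry, dict) and entry.get(field_name) is not None
--     }
--
--     return sorted(unique_values)
-- ===== SOURCE B (Python) =====
-- def get_unique_field_values(
--     entries: list,
--     field_name: str,
-- ) -> list:
--     """Return sorted unique non-null values for one field.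
--
--     Sorts the full multiset gathered by a comprehension, then removes
--     duplicates by adjacency in one pass (no hash set is ever built).
--     """
--     values = sorted(
--         entry.get(field_name)
--         for entry in entries
--         if isinstance(entry, dict) and entry.get(field_name) is not None
--     )
--     result = []
--     for value in values:
--         if result and result[-1] == value:
--             continue
--         result.append(value)
--     return result
-- ===== Notes on version B (the rewrite author's own statement) =====
-- stated objective: alternative
-- what changed: Replaces the hash-set comprehension followed by sorting the set with a comprehension collecting all matching values (duplicates included), a sort of that multiset, and a single adjacency-dedup pass; no set is ever built.
import Mathlib
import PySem

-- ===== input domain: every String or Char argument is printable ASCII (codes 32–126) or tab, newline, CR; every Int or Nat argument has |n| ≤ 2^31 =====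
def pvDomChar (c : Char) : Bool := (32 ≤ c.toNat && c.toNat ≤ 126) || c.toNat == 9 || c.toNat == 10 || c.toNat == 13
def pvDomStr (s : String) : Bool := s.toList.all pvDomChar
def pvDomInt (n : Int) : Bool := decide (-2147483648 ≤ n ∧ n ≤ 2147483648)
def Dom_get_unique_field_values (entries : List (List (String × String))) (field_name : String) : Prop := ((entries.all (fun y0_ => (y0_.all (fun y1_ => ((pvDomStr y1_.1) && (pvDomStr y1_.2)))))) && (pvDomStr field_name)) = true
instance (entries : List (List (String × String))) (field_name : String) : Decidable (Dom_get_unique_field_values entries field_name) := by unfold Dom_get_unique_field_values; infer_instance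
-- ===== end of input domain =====

-- B replaces A's hash-set comprehension + sort-of-the-set with collect-all-values / sort / adjacent-dedup; equal return value, no speed claim.

-- ===== PORT A =====
-- set comprehension building unique_values, then sorted(unique_values)
def get_unique_field_values (entries : List (List (String × String))) (field_name : String) : List String :=
  let unique_values : PySem.Set String :=
    entries.foldl (fun s entry =>
      match (PySem.Dict.mk entry).get? field_name with
      | some v => PySem.Set.add s v
      | none => s) PySem.Set.empty
  PySem.List.sorted unique_values (fun x => x) false

-- ===== PORT B =====
-- the 'for value in values' dedup loop of Source B: skip when result[-1] == value, else append
def bDedupLoop (result : List String) : List String → List String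
  | [] => result
  | value :: rest =>
    if result ≠ [] ∧ result.getLast? = some value then bDedupLoop result rest
    else bDedupLoop (result ++ [value]) rest

-- sorted comprehension of all matching values, then the adjacency-dedup loop
def get_unique_field_values_alt (entries : List (List (String × String))) (field_name : String) : List String :=
  let values : List String :=
    PySem.List.sorted
      (entries.filterMap (fun entry => (PySem.Dict.mk entry).get? field_name))
      (fun x => x) false
  bDedupLoop [] values

-- ===== PRECONDITION & SPEC =====
def Spec_get_unique_field_values (entries : List (List (String × String))) (field_name : String) (out : List String) : Prop := out = get_unique_field_values_alt entries field_name
instance (entries : List (List (String × String))) (field_name : String) (out : List String) : Decidable (Spec_get_unique_field_values entries field_name out) := by unfold Spec_get_unique_field_values; infer_instance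

-- ===== CLAIM (what is proved, stated in full; the proofs are below) =====
def Claim_equal_get_unique_field_values : Prop := ∀ (entries : List (List (String × String))) (field_name : String), Dom_get_unique_field_values entries field_name → Spec_get_unique_field_values entries field_name (get_unique_field_values entries field_name)

-- ===== LEMMAS AND PROOFS =====

-- adjacent dedup with an optional previous element (the invariant shape of B's loop)
def ddAdj : Option String → List String → List String
  | _, [] => []
  | prev, v :: t => if prev = some v then ddAdj prev t else v :: ddAdj (some v) t

theorem foldA_eq_filterMap (field_name : String) (entries : List (List (String × String)))
    (s0 : PySem.Set String) :
    entries.foldl (fun s entry =>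
      match (PySem.Dict.mk entry).get? field_name with
      | some v => PySem.Set.add s v
      | none => s) s0
    = (entries.filterMap (fun e => (PySem.Dict.mk e).get? field_name)).foldl PySem.Set.add s0 := by
  induction entries generalizing s0 with
  | nil => rfl
  | cons e t ih =>
    simp only [List.foldl_cons, List.filterMap_cons]
    cases h : (PySem.Dict.mk e).get? field_name with
    | none => simpa using ih s0
    | some v => simpa using ih (PySem.Set.add s0 v)

theorem bDedupLoop_eq_ddAdj (l : List String) (acc : List String) :
    bDedupLoop acc l = acc ++ ddAdj acc.getLast? l := by
  induction l generalizing acc with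
  | nil => simp [bDedupLoop, ddAdj]
  | cons v t ih =>
    rw [show bDedupLoop acc (v :: t)
        = if acc ≠ [] ∧ acc.getLast? = some v then bDedupLoop acc t
          else bDedupLoop (acc ++ [v]) t from rfl]
    by_cases h : acc.getLast? = some v
    · have hne : acc ≠ [] := by intro hnil; subst hnil; simp at h
      rw [if_pos ⟨hne, h⟩, ih]
      simp [ddAdj, h]
    · have : ¬ (acc ≠ [] ∧ acc.getLast? = some v) := fun hc => h hc.2
      rw [if_neg this, ih]
      have hlast : (acc ++ [v]).getLast? = some v := by simp
      simp [ddAdj, h, hlast]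

theorem mem_ddAdj : ∀ (l : List String), l.Pairwise (· ≤ ·) → ∀ (prev : Option String),
    (∀ p, prev = some p → ∀ y ∈ l, p ≤ y) → ∀ x, (x ∈ ddAdj prev l ↔ x ∈ l ∧ prev ≠ some x) := by
  intro l
  induction l with
  | nil => intro _ prev _ x; simp [ddAdj]
  | cons v t ih =>
    intro hl prev hp x
    obtain ⟨hvt, ht⟩ := List.pairwise_cons.mp hl
    have hsome : ∀ p, some v = some p → ∀ y ∈ t, p ≤ y := by
      intro p hp' y hy
      injection hp' with hvp
      exact hvp ▸ hvt y hy
    by_cases h : prev = some v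
    · subst h
      rw [show ddAdj (some v) (v :: t) = ddAdj (some v) t from by simp [ddAdj]]
      rw [ih ht (some v) hsome x]
      constructor
      · rintro ⟨hx, hne⟩
        exact ⟨List.mem_cons_of_mem _ hx, hne⟩
      · rintro ⟨hx, hne⟩
        rcases List.mem_cons.mp hx with rfl | hx
        · exact absurd rfl hne
        · exact ⟨hx, hne⟩
    · rw [show ddAdj prev (v :: t) = v :: ddAdj (some v) t from by simp [ddAdj, h]]
      rw [List.mem_cons, ih ht (some v) hsome x]
      constructor
      · rintro (rfl | ⟨hx, hne⟩)
        · exact ⟨List.mem_cons_self, fun hc => h hc⟩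
        · refine ⟨List.mem_cons_of_mem _ hx, ?_⟩
          intro hc
          have hxlev : x ≤ v := hp x hc v List.mem_cons_self
          have hvlex : v ≤ x := hvt x hx
          exact h ((le_antisymm hxlev hvlex) ▸ hc)
      · rintro ⟨hx, hne⟩
        rcases List.mem_cons.mp hx with rfl | hx
        · exact Or.inl rfl
        · by_cases hxv : x = v
          · exact Or.inl hxv
          · exact Or.inr ⟨hx, fun hc => hxv (Option.some.inj hc).symm⟩

theorem pairwise_ddAdj : ∀ (l : List String), l.Pairwise (· ≤ ·) → ∀ (prev : Option String),
    (∀ p, prev = some p → ∀ y ∈ l, p ≤ y) → (ddAdj prev l).Pairwise (· < ·) := by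
  intro l
  induction l with
  | nil => intro _ prev _; simp [ddAdj]
  | cons v t ih =>
    intro hl prev hp
    obtain ⟨hvt, ht⟩ := List.pairwise_cons.mp hl
    have hsome : ∀ p, some v = some p → ∀ y ∈ t, p ≤ y := by
      intro p hp' y hy
      injection hp' with hvp
      exact hvp ▸ hvt y hy
    by_cases h : prev = some v
    · rw [show ddAdj prev (v :: t) = ddAdj (some v) t from by simp [ddAdj, h]]
      exact ih ht (some v) hsome
    · rw [show ddAdj prev (v :: t) = v :: ddAdj (some v) t from by simp [ddAdj, h]]
      refine List.pairwise_cons.mpr ⟨?_, ih ht (some v) hsome⟩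
      intro y hy
      have hym := (mem_ddAdj t ht (some v) hsome y).mp hy
      exact lt_of_le_of_ne (hvt y hym.1) (fun hvy => hym.2 (congrArg some hvy))

theorem sorted_set_eq_ddAdj_sorted (vals : List String) :
    PySem.List.sorted (PySem.Set.ofList vals) (fun x => x) false
    = ddAdj none (PySem.List.sorted vals (fun x => x) false) := by
  have hS : (PySem.List.sorted vals (fun x => x) false).Pairwise (· ≤ ·) :=
    PySem.List.sorted_pairwise vals (fun x => x)
  have hnone : ∀ p, (none : Option String) = some p →
      ∀ y ∈ PySem.List.sorted vals (fun x => x) false, p ≤ y := by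
    intro p hp; exact absurd hp (by simp)
  have hpair := pairwise_ddAdj _ hS none hnone
  have hmem : ∀ x, x ∈ ddAdj none (PySem.List.sorted vals (fun x => x) false) ↔
      x ∈ PySem.Set.ofList vals := by
    intro x
    rw [mem_ddAdj _ hS none hnone x, PySem.Set.mem_ofList, PySem.List.mem_sorted]
    simp
  have hnodup : (ddAdj none (PySem.List.sorted vals (fun x => x) false)).Nodup :=
    hpair.imp ne_of_lt
  have hperm : (ddAdj none (PySem.List.sorted vals (fun x => x) false)).Perm
      (PySem.Set.ofList vals) :=
    (List.perm_ext_iff_of_nodup hnodup (PySem.Set.nodup_ofList vals)).mpr hmem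
  exact PySem.List.sorted_eq_of_perm_of_pairwise_lt _ _ _ hperm hpair

-- ===== VERDICT (by name: the statement is the Claim_ definition above) =====
theorem get_unique_field_values_spec : Claim_equal_get_unique_field_values := by
  intro entries field_name _
  unfold Spec_get_unique_field_values get_unique_field_values get_unique_field_values_alt
  rw [foldA_eq_filterMap, bDedupLoop_eq_ddAdj]
  simp only [List.nil_append, List.getLast?_nil]
  exact sorted_set_eq_ddAdj_sorted _
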